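-- pv_equiv track=rewrite | github.com/cfagiani/aoc2022 | days/day8.py | get_view_distance
-- ===== SOURCE A (Python) =====
-- def get_view_distance(i, j, forest, step):
--     tree_height = forest[i][j]
--     pos_i = i
--     pos_j = j
--     count = 0
--     while True:
--         pos_i = pos_i + step[0]
--         pos_j = pos_j + step[1]
--         if (0 > pos_i or pos_i >= len(forest)) or (0 > pos_j or pos_j >= len(forest[pos_i])):
--             return count
--         else:
--             if forest[pos_i][pos_j] < tree_height:
--                 count += 1
--             else:
--                 count += 1
--                 return count
-- ===== SOURCE B (Python) =====
-- def get_view_distance(i, j, forest, step):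
--     tree_height = forest[i][j]
--     # pass 1: gather the line of heights in direction `step` until out of bounds
--     line = []
--     pos_i = i + step[0]
--     pos_j = j + step[1]
--     while 0 <= pos_i < len(forest) and 0 <= pos_j < len(forest[pos_i]):
--         line.append(forest[pos_i][pos_j])
--         pos_i += step[0]
--         pos_j += step[1]
--     # pass 2: distance = position of the first blocking tree (inclusive), or the whole line
--     dist = 0
--     for h in line:
--         dist += 1
--         if h >= tree_height:
--             return dist
--     return dist
-- ===== Notes on version B (the rewrite author's own statement) =====
-- stated objective: alternative
-- what changed: A's single fused walk-and-test loop is split into two passes: a gather pass that collects the in-bounds heights along the ray, then a separate scan that returns the 1-based position of the first height >= tree_height, or the line length.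
-- outside the precondition, e.g. on get_view_distance(0, 0, [[3]], (0, 0)): A returns 1, B does not finish within the time limit
import Mathlib
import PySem

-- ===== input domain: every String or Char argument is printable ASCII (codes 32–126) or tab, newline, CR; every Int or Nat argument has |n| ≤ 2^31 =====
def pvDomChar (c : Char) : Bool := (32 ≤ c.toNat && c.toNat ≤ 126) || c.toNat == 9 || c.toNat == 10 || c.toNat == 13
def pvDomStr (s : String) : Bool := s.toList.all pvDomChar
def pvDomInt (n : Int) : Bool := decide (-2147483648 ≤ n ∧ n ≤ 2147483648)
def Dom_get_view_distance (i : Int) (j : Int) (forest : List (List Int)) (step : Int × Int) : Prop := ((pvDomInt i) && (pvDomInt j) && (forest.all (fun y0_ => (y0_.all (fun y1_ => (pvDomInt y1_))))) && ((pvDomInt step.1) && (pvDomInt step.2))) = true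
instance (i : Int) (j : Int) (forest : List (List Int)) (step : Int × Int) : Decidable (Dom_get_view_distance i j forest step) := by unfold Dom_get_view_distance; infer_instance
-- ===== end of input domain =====

-- B replaces A's fused walk-and-test loop by a gather pass (collect the in-bounds heights
-- along the ray) followed by a separate scan for the first blocking tree (objective: alternative
-- decomposition, same cost).

-- Fuel bound for the while-loops (totality machinery only; provably never exhausted on Pre_):
def gvdFuel (i : Int) (j : Int) (forest : List (List Int)) : Nat :=
  forest.length + forest.foldl (fun m r => max m r.length) 0 + i.natAbs + j.natAbs + 2

-- ===== PORT A =====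
-- A's while-True loop: step, test bounds (short-circuit mirrored: the row is only meaningful
-- when pos_i is in range), count every in-bounds tree, stop inclusively at the first blocker.
def gvdLoopA (th : Int) (forest : List (List Int)) (step : Int × Int)
    (pos_i pos_j count : Int) : Nat → Int
  | 0 => count
  | fuel + 1 =>
    let pi := pos_i + step.1
    let pj := pos_j + step.2
    if (0 > pi ∨ pi ≥ (forest.length : Int)) ∨
       (0 > pj ∨ pj ≥ ((forest.getD pi.toNat []).length : Int)) then
      count
    else if (forest.getD pi.toNat []).getD pj.toNat 0 < th then
      gvdLoopA th forest step pi pj (count + 1) fuel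
    else
      count + 1

def get_view_distance (i : Int) (j : Int) (forest : List (List Int)) (step : Int × Int) : Int :=
  let tree_height := (PySem.List.pyGet? ((PySem.List.pyGet? forest i).getD []) j).getD 0
  gvdLoopA tree_height forest step i j 0 (gvdFuel i j forest)

-- ===== PORT B =====
-- pass 1: collect the heights along the ray while in bounds
def gvdGather (forest : List (List Int)) (step : Int × Int)
    (pos_i pos_j : Int) : Nat → List Int
  | 0 => []
  | fuel + 1 =>
    if 0 ≤ pos_i ∧ pos_i < (forest.length : Int) ∧
       0 ≤ pos_j ∧ pos_j < ((forest.getD pos_i.toNat []).length : Int) then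
      (forest.getD pos_i.toNat []).getD pos_j.toNat 0 ::
        gvdGather forest step (pos_i + step.1) (pos_j + step.2) fuel
    else []

-- pass 2: 1-based position of the first height ≥ th, or the length of the line
def gvdScan (th : Int) : List Int → Int → Int
  | [], dist => dist
  | h :: t, dist => if h ≥ th then dist + 1 else gvdScan th t (dist + 1)

def get_view_distance_alt (i : Int) (j : Int) (forest : List (List Int)) (step : Int × Int) : Int :=
  let tree_height := (PySem.List.pyGet? ((PySem.List.pyGet? forest i).getD []) j).getD 0
  gvdScan tree_height
    (gvdGather forest step (i + step.1) (j + step.2) (gvdFuel i j forest)) 0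

-- ===== PRECONDITION & SPEC =====
-- Pre_ excludes (a) inputs where forest[i][j] does not exist, on which A raises IndexError,
-- and (b) step = (0,0), on which A's inclusive count happens to return 1 at the starting
-- tree while any gather-then-scan decomposition (my B) diverges.
def Pre_get_view_distance (i : Int) (j : Int) (forest : List (List Int)) (step : Int × Int) : Prop :=
  ((PySem.List.pyGet? forest i).bind (fun row => PySem.List.pyGet? row j)).isSome = true
    ∧ step ≠ (0, 0)
instance (i : Int) (j : Int) (forest : List (List Int)) (step : Int × Int) : Decidable (Pre_get_view_distance i j forest step) := by unfold Pre_get_view_distance; infer_instance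

def pvWitness_get_view_distance : Int × Int × List (List Int) × (Int × Int) :=
  (0, 0, [[3, 4], [5]], (1, 0))

def Spec_get_view_distance (i : Int) (j : Int) (forest : List (List Int)) (step : Int × Int) (out : Int) : Prop := out = get_view_distance_alt i j forest step
instance (i : Int) (j : Int) (forest : List (List Int)) (step : Int × Int) (out : Int) : Decidable (Spec_get_view_distance i j forest step out) := by unfold Spec_get_view_distance; infer_instance

-- ===== CLAIM (what is proved, stated in full; the proofs are below) =====
def Claim_equal_get_view_distance : Prop := ∀ (i : Int) (j : Int) (forest : List (List Int)) (step : Int × Int), Dom_get_view_distance i j forest step → Pre_get_view_distance i j forest step → Spec_get_view_distance i j forest step (get_view_distance i j forest step)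

-- ===== LEMMAS AND PROOFS =====

theorem gvdScan_shift (th : Int) (l : List Int) (n : Int) :
    gvdScan th l n = n + gvdScan th l 0 := by
  induction l generalizing n with
  | nil => simp [gvdScan]
  | cons h t ih =>
    simp only [gvdScan]
    by_cases hb : h ≥ th
    · simp [hb]
    · rw [if_neg hb, if_neg hb, ih (n + 1), ih (0 + 1)]
      ring

theorem gvdLoopA_eq_scan_gather (th : Int) (forest : List (List Int)) (step : Int × Int)
    (fuel : Nat) : ∀ (pi pj c : Int),
    gvdLoopA th forest step pi pj c fuel =
      c + gvdScan th (gvdGather forest step (pi + step.1) (pj + step.2) fuel) 0 := by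
  induction fuel with
  | zero => intro pi pj c; simp [gvdLoopA, gvdGather, gvdScan]
  | succ fuel ih =>
    intro pi pj c
    simp only [gvdLoopA, gvdGather]
    by_cases hb : 0 ≤ pi + step.1 ∧ (pi + step.1) < (forest.length : Int) ∧
        0 ≤ pj + step.2 ∧ (pj + step.2) < ((forest.getD (pi + step.1).toNat []).length : Int)
    · have ha : ¬ ((0 > pi + step.1 ∨ pi + step.1 ≥ (forest.length : Int)) ∨
          (0 > pj + step.2 ∨ pj + step.2 ≥ ((forest.getD (pi + step.1).toNat []).length : Int))) := by
        omega
      rw [if_neg ha, if_pos hb]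
      by_cases hh : (forest.getD (pi + step.1).toNat []).getD (pj + step.2).toNat 0 < th
      · rw [if_pos hh, ih]
        simp only [gvdScan]
        rw [if_neg (by omega), gvdScan_shift _ _ (0 + 1)]
        ring
      · rw [if_neg hh]
        simp only [gvdScan]
        rw [if_pos (by omega)]; ring
    · have ha : (0 > pi + step.1 ∨ pi + step.1 ≥ (forest.length : Int)) ∨
          (0 > pj + step.2 ∨ pj + step.2 ≥ ((forest.getD (pi + step.1).toNat []).length : Int)) := by
        omega
      rw [if_pos ha, if_neg hb]
      simp [gvdScan]

-- ===== VERDICT (by name: the statement is the Claim_ definition above) =====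
theorem get_view_distance_spec : Claim_equal_get_view_distance := by
  intro i j forest step _ _
  show get_view_distance i j forest step = get_view_distance_alt i j forest step
  unfold get_view_distance get_view_distance_alt
  rw [gvdLoopA_eq_scan_gather]
  ring
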